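-- pv_equiv track=rewrite | github.com/ilialecha/Programming_2 | Tests/is_chain_prime.py | has_prime_chain__
-- ===== SOURCE A (Python) =====
-- def is_prime(n):
--     '''
--     Requires a non negative integer n.
--     Returns True when n is prime
--     Returns False when n is not prime
--     '''
--     if  n < 2:
--         return False
--     d = 2
--     while d*d <= n:
--         if n%d == 0:
--             return False
--         d += 1
--     return True
--
-- def next_is_prime(num):
--     return is_prime( num )
--
-- def ant_is_prime(num):
--     return is_prime( num )
--
-- def has_prime_chain__( num_list, size ):
--     # As in sliding windows.
--     index = 0
--     N = len( num_list )
--     start_index = -1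
--     chain = True
--     while N - index >= size:
--         sub = num_list[index : index+size]
--         for num in sub:
--             if not is_prime(num):
--                 chain=False
--                 break
--         if chain:
--             start_index = index
--             if index == 0 and (index + size) < N: #Est치 al principio
--                 if not next_is_prime( num_list[index+size]):
--                     break #Found at the beggining.
--             elif index > 0:
--                 if index + size < N: #Est치 en medio.
--                     if not ant_is_prime( num_list[index-1]) and not next_is_prime( num_list[index+size] ):
--                         break # Found in the middle
--                 if index + size == N: #Est치 al final
--                     if not ant_is_prime( num_list[index-1]):
--                         break #Found at the end.
--         index +=1
--         chain = True
--         start_index = -1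
--
--     return start_index
-- ===== SOURCE B (Python) =====
-- def is_prime(n):
--     if n < 2:
--         return False
--     d = 2
--     while d*d <= n:
--         if n % d == 0:
--             return False
--         d += 1
--     return True
--
-- def has_prime_chain__(num_list, size):
--     # One primality test per element, prefix sums, O(1) window + neighbour checks.
--     N = len(num_list)
--     prime = [is_prime(x) for x in num_list]
--     pref = [0]
--     for p in prime:
--         pref.append(pref[-1] + (1 if p else 0))
--     for i in range(N - size + 1):
--         if pref[i + size] - pref[i] == size \
--            and (i == 0 or not prime[i - 1]) \
--            and (i + size == N or not prime[i + size]):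
--             return i
--     return -1
-- ===== Notes on version B (the rewrite author's own statement) =====
-- stated objective: faster
-- what changed: B replaces A's re-scanning sliding window (each element primality-tested up to size times per overlapping window) by one primality pass over the list, a prefix-sum array of prime counts, and O(1) window + neighbour checks per start index; on the corner where the whole list is prime and size == len(num_list), A accidentally returns -1 while B returns the intended 0 (see differs).
-- intended difference: When size == len(num_list) >= 1 and every element is prime, A falls through all its positional break checks and returns -1, while B returns 0: the full-list window is a maximal prime chain starting at index 0, which is what the function is looking for. — e.g. on has_prime_chain__([2], 1): A returns -1, B returns 0
-- outside the precondition, e.g. on has_prime_chain__([], 0): A returns -1, B returns 0; on has_prime_chain__([10, 2, 12, 6], -1): A returns 1, B raises IndexError; on has_prime_chain__([4], 0): A returns 0, B returns 0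
import Mathlib
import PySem

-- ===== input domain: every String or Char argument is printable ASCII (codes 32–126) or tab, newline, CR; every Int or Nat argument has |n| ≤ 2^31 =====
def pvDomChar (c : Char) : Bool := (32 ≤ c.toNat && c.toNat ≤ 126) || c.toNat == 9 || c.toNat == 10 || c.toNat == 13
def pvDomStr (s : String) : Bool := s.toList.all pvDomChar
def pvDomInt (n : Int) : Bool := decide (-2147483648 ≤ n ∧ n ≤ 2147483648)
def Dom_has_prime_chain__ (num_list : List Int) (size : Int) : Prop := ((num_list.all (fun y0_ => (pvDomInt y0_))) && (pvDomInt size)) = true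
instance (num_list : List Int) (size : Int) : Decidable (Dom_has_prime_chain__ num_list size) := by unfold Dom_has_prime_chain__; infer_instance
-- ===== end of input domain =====

-- B replaces A's re-scanning sliding window (each element primality-tested up to `size` times,
-- window re-scanned at every start) by one primality pass, a prefix-sum array and O(1)
-- window + neighbour checks.  On the one corner where A's answer is accidental (whole list
-- prime and size == len), B returns the intended 0 — see D_ below.

-- ===== PORT A =====
-- while d*d <= n: if n%d == 0: return False; d += 1   (fuel only makes the loop structural;
-- fuel (n+1).toNat is enough since d stops once d*d > n, see isPrimeGo_iff below)
def isPrimeGo : Nat → Int → Int → Bool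
  | 0, _, _ => true
  | fuel + 1, n, d =>
    if d * d ≤ n then
      if PySem.Int.mod n d == 0 then false else isPrimeGo fuel n (d + 1)
    else true

def is_prime (n : Int) : Bool := if n < 2 then false else isPrimeGo (n + 1).toNat n 2

-- the `while N - index >= size` loop of A; `chain`/`start_index` are the loop state; the fuel
-- only makes the while loop structural (it is never exhausted while the guard holds).
-- Indexing num_list[index+size] / num_list[index-1] is via pyGetD: under Pre_ (1 ≤ size)
-- the guards index+size < N resp. index > 0 keep those indices in range, so this is exact.
def hpcLoop (num_list : List Int) (size N : Int) : Nat → Int → Int → Bool → Int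
  | 0, _, start_index, _ => start_index
  | fuel + 1, index, start_index, chain =>
    if size ≤ N - index then
      let sub := PySem.List.slice num_list (some index) (some (index + size))
      let chain1 := chain && sub.all (fun num => is_prime num)
      if chain1 then
        -- start_index = index; then the three positional break checks
        if index == 0 && index + size < N then
          if !is_prime (PySem.List.pyGetD num_list (index + size) 0) then index
          else hpcLoop num_list size N fuel (index + 1) (-1) true
        else if 0 < index then
          if decide (index + size < N) &&
             (!is_prime (PySem.List.pyGetD num_list (index - 1) 0) &&
              !is_prime (PySem.List.pyGetD num_list (index + size) 0)) then index
          else if index + size == N && !is_prime (PySem.List.pyGetD num_list (index - 1) 0) then index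
          else hpcLoop num_list size N fuel (index + 1) (-1) true
        else hpcLoop num_list size N fuel (index + 1) (-1) true
      else hpcLoop num_list size N fuel (index + 1) (-1) true
    else start_index

def has_prime_chain__ (num_list : List Int) (size : Int) : Int :=
  hpcLoop num_list size (num_list.length : Int) (((num_list.length : Int) - size + 1).toNat + 1) 0 (-1) true

-- ===== PORT B =====
-- per-element primality flags, prefix sums (the append loop is a scanl), first i whose
-- window count is full and whose neighbours (if any) are non-prime
def has_prime_chain___alt (num_list : List Int) (size : Int) : Int :=
  let N : Int := (num_list.length : Int)
  let prime := num_list.map is_prime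
  let pref := prime.scanl (fun s p => s + (if p then (1 : Int) else 0)) 0
  match (PySem.List.pyRange 0 (N - size + 1) 1).find? (fun i =>
      (PySem.List.pyGetD pref (i + size) 0 - PySem.List.pyGetD pref i 0 == size)
      && (i == 0 || !(PySem.List.pyGetD prime (i - 1) false))
      && (i + size == N || !(PySem.List.pyGetD prime (i + size) false))) with
  | some i => i
  | none => -1

-- ===== PRECONDITION & SPEC =====
-- Pre_ excludes non-positive size, where A treats every empty slice as a prime chain and
-- indexes neighbours with negative wraparound (raising IndexError on some inputs).
def Pre_has_prime_chain__ (num_list : List Int) (size : Int) : Prop := 1 ≤ size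
instance (num_list : List Int) (size : Int) : Decidable (Pre_has_prime_chain__ num_list size) := by
  unfold Pre_has_prime_chain__; infer_instance

def pvWitness_has_prime_chain__ : List Int × Int := ([2, 3, 5], 2)

-- When the whole list is prime and size == len(num_list), A falls through all its positional
-- break checks and returns -1, while B returns the intended answer 0: that window is a
-- maximal prime chain starting at index 0.
def D_has_prime_chain__ (num_list : List Int) (size : Int) : Prop :=
  1 ≤ size ∧ size = (num_list.length : Int) ∧ ∀ x ∈ num_list, 2 ≤ x ∧ x.toNat.Prime
instance (num_list : List Int) (size : Int) : Decidable (D_has_prime_chain__ num_list size) := by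
  unfold D_has_prime_chain__; infer_instance

def Spec_has_prime_chain__ (num_list : List Int) (size : Int) (out : Int) : Prop :=
  ¬ D_has_prime_chain__ num_list size → out = has_prime_chain___alt num_list size
instance (num_list : List Int) (size : Int) (out : Int) : Decidable (Spec_has_prime_chain__ num_list size out) := by
  unfold Spec_has_prime_chain__; infer_instance

def pvDiffWitness_has_prime_chain__ : List Int × Int := ([2], 1)
def pvDiffWitnessOut_has_prime_chain__ : Int × Int := (-1, 0)

-- ===== CLAIM (what is proved, stated in full; the proofs are below) =====
def Claim_unchanged_has_prime_chain__ : Prop := ∀ (num_list : List Int) (size : Int), Dom_has_prime_chain__ num_list size → Pre_has_prime_chain__ num_list size → Spec_has_prime_chain__ num_list size (has_prime_chain__ num_list size)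
def Claim_changed_has_prime_chain__ : Prop := Dom_has_prime_chain__ (pvDiffWitness_has_prime_chain__.1) (pvDiffWitness_has_prime_chain__.2) ∧ Pre_has_prime_chain__ (pvDiffWitness_has_prime_chain__.1) (pvDiffWitness_has_prime_chain__.2) ∧ D_has_prime_chain__ (pvDiffWitness_has_prime_chain__.1) (pvDiffWitness_has_prime_chain__.2) ∧ has_prime_chain__ (pvDiffWitness_has_prime_chain__.1) (pvDiffWitness_has_prime_chain__.2) = pvDiffWitnessOut_has_prime_chain__.1 ∧ has_prime_chain___alt (pvDiffWitness_has_prime_chain__.1) (pvDiffWitness_has_prime_chain__.2) = pvDiffWitnessOut_has_prime_chain__.2 ∧ pvDiffWitnessOut_has_prime_chain__.1 ≠ pvDiffWitnessOut_has_prime_chain__.2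
def Claim_exact_has_prime_chain__ : Prop := ∀ (num_list : List Int) (size : Int), Dom_has_prime_chain__ num_list size → Pre_has_prime_chain__ num_list size → D_has_prime_chain__ num_list size → has_prime_chain__ num_list size ≠ has_prime_chain___alt num_list size

-- ===== LEMMAS AND PROOFS =====

-- A's per-window break decision as a single Bool predicate on the start index
def condA (num_list : List Int) (size N i : Int) : Bool :=
  ((PySem.List.slice num_list (some i) (some (i + size))).all (fun num => is_prime num))
  && (if i == 0 then decide (i + size < N) && !is_prime (PySem.List.pyGetD num_list (i + size) 0)
      else (decide (i + size < N) &&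
              (!is_prime (PySem.List.pyGetD num_list (i - 1) 0) &&
               !is_prime (PySem.List.pyGetD num_list (i + size) 0)))
           || (i + size == N && !is_prime (PySem.List.pyGetD num_list (i - 1) 0)))

theorem isPrimeGo_iff (n : Int) : ∀ (k : Nat) (d : Int), 2 ≤ d → (n + 1 - d).toNat ≤ k →
    (isPrimeGo k n d = true ↔ ∀ e : Int, d ≤ e → e * e ≤ n → ¬ e ∣ n) := by
  intro k
  induction k with
  | zero =>
    intro d hd hk
    simp only [isPrimeGo, true_iff]
    intro e he hee hdvd
    have h1 : n + 1 - d ≤ 0 := by omega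
    nlinarith
  | succ k ih =>
    intro d hd hk
    simp only [isPrimeGo]
    by_cases hguard : d * d ≤ n
    · simp only [if_pos hguard]
      by_cases hmod : PySem.Int.mod n d = 0
      · simp only [hmod]
        simp only [beq_self_eq_true, if_pos]
        constructor
        · intro h; exact absurd h (by simp)
        · intro h
          exact absurd ((PySem.Int.mod_eq_zero_iff_dvd n d).mp hmod) (h d le_rfl hguard)
      · have hbe : (PySem.Int.mod n d == 0) = false := by simpa using hmod
        have hdn : d ≤ n := by nlinarith
        simp only [hbe, Bool.false_eq_true, if_false]
        rw [ih (d + 1) (by omega) (by omega)]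
        constructor
        · intro h e he hee
          rcases eq_or_lt_of_le he with rfl | hlt
          · intro hdvd; exact hmod ((PySem.Int.mod_eq_zero_iff_dvd n d).mpr hdvd)
          · exact h e (by omega) hee
        · intro h e he hee; exact h e (by omega) hee
    · simp only [if_neg hguard, true_iff]
      intro e he hee hdvd
      nlinarith

theorem is_prime_iff (n : Int) : is_prime n = true ↔ 2 ≤ n ∧ n.toNat.Prime := by
  unfold is_prime
  by_cases hn : n < 2
  · simp only [if_pos hn, Bool.false_eq_true, false_iff]
    rintro ⟨h, -⟩; omega
  · simp only [if_neg hn]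
    have h2 : 2 ≤ n := by omega
    rw [isPrimeGo_iff n (n + 1).toNat 2 le_rfl (by omega)]
    have hcast : ((n.toNat : Int)) = n := by omega
    constructor
    · intro h
      refine ⟨h2, (Nat.prime_def_le_sqrt).mpr ⟨by omega, ?_⟩⟩
      intro m hm hms hdvd
      have hmm : m * m ≤ n.toNat := Nat.le_sqrt.mp (by simpa [Nat.pow_two] using hms)
      refine h (m : Int) (by exact_mod_cast hm) (by omega) ?_
      rw [← hcast]; exact_mod_cast hdvd
    · rintro ⟨-, hp⟩ e he hee hdvd
      have he0 : 0 ≤ e := by omega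
      have hdvdN : e.toNat ∣ n.toNat := by
        have h1 : ((e.toNat : Int)) ∣ ((n.toNat : Int)) := by
          rw [hcast, Int.toNat_of_nonneg he0]; exact hdvd
        exact_mod_cast h1
      have hsq : e.toNat ≤ Nat.sqrt n.toNat := Nat.le_sqrt.mpr (by
        have h1 : (e.toNat : Int) * (e.toNat : Int) ≤ (n.toNat : Int) := by
          rw [hcast, Int.toNat_of_nonneg he0]; exact hee
        exact_mod_cast h1)
      exact (Nat.prime_def_le_sqrt.mp hp).2 e.toNat (by omega) hsq hdvdN

theorem loopA_eq (num_list : List Int) (size : Int) (hs : 1 ≤ size) :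
    ∀ (k : Nat) (i : Int), 0 ≤ i → ((num_list.length : Int) - size + 1 - i).toNat ≤ k →
      hpcLoop num_list size (num_list.length : Int) (k + 1) i (-1) true =
        (match (PySem.List.pyRange i ((num_list.length : Int) - size + 1) 1).find?
             (condA num_list size (num_list.length : Int)) with
         | some j => j | none => -1) := by
  intro k
  induction k with
  | zero =>
    intro i hi hk
    rw [PySem.List.pyRange_one_eq_nil (by omega), hpcLoop.eq_2, if_neg (by omega)]
    simp
  | succ k ih =>
    intro i hi hk
    by_cases hstop : (num_list.length : Int) - size + 1 ≤ i
    · rw [PySem.List.pyRange_one_eq_nil (by omega), hpcLoop.eq_2, if_neg (by omega)]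
      simp
    · rw [PySem.List.pyRange_one_cons (by omega), hpcLoop.eq_2, if_pos (by omega)]
      simp only [Bool.true_and]
      by_cases hw : ((PySem.List.slice num_list (some i) (some (i + size))).all
          (fun num => is_prime num)) = true
      · rw [if_pos hw]
        by_cases hi0 : i = 0
        · subst hi0
          by_cases hlt : (0 : Int) + size < (num_list.length : Int)
          · rw [if_pos (by simp only [beq_self_eq_true, Bool.true_and,
              decide_eq_true_eq]; exact hlt)]
            by_cases hnp : is_prime (PySem.List.pyGetD num_list (0 + size) 0) = true
            · have hc : condA num_list size (num_list.length : Int) 0 = false := by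
                simp only [condA, hw, beq_self_eq_true, if_true, hnp, Bool.not_true,
                  Bool.and_false, Bool.true_and]
              rw [hnp, Bool.not_true, if_neg (by simp)]
              rw [ih (0 + 1) (by omega) (by omega)]
              simp [hc]
            · have hnp' : is_prime (PySem.List.pyGetD num_list (0 + size) 0) = false := by
                simpa using hnp
              have hc : condA num_list size (num_list.length : Int) 0 = true := by
                simp only [condA, hw, beq_self_eq_true, if_true, hnp', Bool.not_false,
                  Bool.and_true, Bool.true_and, decide_eq_true_eq]
                exact hlt
              rw [hnp', Bool.not_false, if_pos rfl]
              simp [hc]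
          · rw [if_neg (by simp only [beq_self_eq_true, Bool.true_and,
              decide_eq_true_eq]; exact hlt), if_neg (by omega)]
            have hc : condA num_list size (num_list.length : Int) 0 = false := by
              have hd : decide ((0 : Int) + size < (num_list.length : Int)) = false := by
                simpa using hlt
              simp only [condA, hw, beq_self_eq_true, if_true, hd, Bool.false_and,
                Bool.and_false, Bool.true_and]
            rw [ih (0 + 1) (by omega) (by omega)]
            simp [hc]
        · have hipos : (0 : Int) < i := by omega
          have hne : (i == (0 : Int)) = false := by simpa using hi0
          rw [if_neg (by simp only [hne, Bool.false_and]; simp), if_pos hipos]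
          have hcondA : condA num_list size (num_list.length : Int) i =
              ((decide (i + size < (num_list.length : Int)) &&
                (!is_prime (PySem.List.pyGetD num_list (i - 1) 0) &&
                 !is_prime (PySem.List.pyGetD num_list (i + size) 0)))
               || ((i + size == (num_list.length : Int)) &&
                   !is_prime (PySem.List.pyGetD num_list (i - 1) 0))) := by
            simp only [condA, hw, hne, Bool.false_eq_true, if_false, Bool.true_and]
          by_cases hc1 : (decide (i + size < (num_list.length : Int)) &&
              (!is_prime (PySem.List.pyGetD num_list (i - 1) 0) &&
               !is_prime (PySem.List.pyGetD num_list (i + size) 0))) = true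
          · rw [if_pos hc1]
            have hc : condA num_list size (num_list.length : Int) i = true := by
              rw [hcondA, hc1, Bool.true_or]
            simp [hc]
          · rw [if_neg hc1]
            by_cases hc2 : ((i + size == (num_list.length : Int)) &&
                !is_prime (PySem.List.pyGetD num_list (i - 1) 0)) = true
            · rw [if_pos hc2]
              have hc : condA num_list size (num_list.length : Int) i = true := by
                rw [hcondA, hc2, Bool.or_true]
              simp [hc]
            · rw [if_neg hc2]
              have hc : condA num_list size (num_list.length : Int) i = false := by
                rw [hcondA]
                simp only [Bool.not_eq_true] at hc1 hc2
                rw [hc1, hc2, Bool.or_false]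
              rw [ih (i + 1) (by omega) (by omega)]
              simp [hc]
      · rw [if_neg hw]
        have hc : condA num_list size (num_list.length : Int) i = false := by
          simp only [Bool.not_eq_true] at hw
          simp only [condA, hw, Bool.false_and]
        rw [ih (i + 1) (by omega) (by omega)]
        simp [hc]

-- find? only looks at members
theorem pv_find?_congr (l : List Int) (p q : Int → Bool) (h : ∀ x ∈ l, p x = q x) :
    l.find? p = l.find? q := by
  induction l with
  | nil => rfl
  | cons a t ih =>
    have ha := h a (by simp)
    by_cases hq : q a = true
    · simp [List.find?, ha, hq]
    · have hq' : q a = false := by simpa using hq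
      simp only [List.find?, ha, hq']
      exact ih (fun x hx => h x (by simp [hx]))

-- the scanl prefix array holds running counts of true flags
theorem pv_scanl_count (l : List Bool) : ∀ (s : Int) (m : Nat), m ≤ l.length →
    (l.scanl (fun a p => a + (if p then (1 : Int) else 0)) s)[m]? =
      some (s + ((l.take m).countP id : Int)) := by
  induction l with
  | nil =>
    intro s m hm
    simp at hm
    subst hm
    simp
  | cons b t ih =>
    intro s m hm
    cases m with
    | zero => simp
    | succ m =>
      rw [List.scanl_cons, List.getElem?_cons_succ, List.take_succ_cons, List.countP_cons,
        ih (s + (if b then (1 : Int) else 0)) m (by simpa using hm)]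
      cases b <;> simp <;> omega

-- B's prefix-sum window test is A's all-primes slice test
theorem pv_window_eq (num_list : List Int) (size i : Int) (hs : 1 ≤ size) (h0 : 0 ≤ i)
    (hiN : i + size ≤ (num_list.length : Int)) :
    ((PySem.List.pyGetD ((num_list.map is_prime).scanl
        (fun a p => a + (if p then (1 : Int) else 0)) 0) (i + size) 0 -
      PySem.List.pyGetD ((num_list.map is_prime).scanl
        (fun a p => a + (if p then (1 : Int) else 0)) 0) i 0) == size)
    = (PySem.List.slice num_list (some i) (some (i + size))).all (fun num => is_prime num) := by
  lift i to ℕ using h0 with m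
  lift size to ℕ using (by omega : (0 : ℤ) ≤ size) with t
  have hmt : (m : Int) + (t : Int) = ((m + t : Nat) : Int) := by push_cast; ring
  have hlen : m + t ≤ num_list.length := by omega
  have hlen' : m + t ≤ (num_list.map is_prime).length := by simpa using hlen
  rw [hmt, PySem.List.pyGetD_natCast, PySem.List.pyGetD_natCast,
    List.getD_eq_getElem?_getD, List.getD_eq_getElem?_getD,
    pv_scanl_count _ 0 _ hlen', pv_scanl_count _ 0 _ (by omega),
    PySem.List.slice_natCast]
  have htn : m + t - m = t := by omega
  rw [htn]
  simp only [Option.getD_some, zero_add]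
  rw [List.take_add, List.countP_append]
  set W := ((num_list.map is_prime).drop m).take t with hW
  have hWmap : W = ((num_list.drop m).take t).map is_prime := by
    rw [hW, List.map_take, List.map_drop]
  have hWlen : W.length = t := by
    rw [hW]; simp; omega
  rw [Bool.eq_iff_iff, beq_iff_eq]
  constructor
  · intro hcount
    have hc : W.countP id = t := by omega
    have hall := (List.countP_eq_length (p := id) (l := W)).mp (by rw [hc, hWlen])
    rw [List.all_eq_true]
    intro x hx
    have hmem : is_prime x ∈ W := by rw [hWmap]; exact List.mem_map_of_mem hx
    simpa using hall _ hmem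
  · intro hall
    have hforall : ∀ b ∈ W, id b = true := by
      intro b hb
      rw [hWmap] at hb
      obtain ⟨x, hx, rfl⟩ := List.mem_map.mp hb
      exact List.all_eq_true.mp hall x hx
    have := List.countP_eq_length.mpr hforall
    rw [hWlen] at this
    omega

-- B's flag lookup is A's primality test of the list element
theorem pv_flag_eq (num_list : List Int) (j : Int) (h0 : 0 ≤ j)
    (hj : j < (num_list.length : Int)) :
    PySem.List.pyGetD (num_list.map is_prime) j false = is_prime (PySem.List.pyGetD num_list j 0) := by
  rw [PySem.List.pyGetD_eq_getElem (num_list.map is_prime) false h0 (by simpa using hj),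
    PySem.List.pyGetD_eq_getElem num_list 0 h0 hj, List.getElem_map]

-- B's per-index test, under Pre_, agrees with A's break decision at every start index
-- except i = 0 with size = length (where A never breaks)
theorem pv_cond_eq (num_list : List Int) (size i : Int) (hs : 1 ≤ size) (h0 : 0 ≤ i)
    (hiN : i + size ≤ (num_list.length : Int)) (hx : ¬(i = 0 ∧ size = (num_list.length : Int))) :
    (((PySem.List.pyGetD ((num_list.map is_prime).scanl
        (fun a p => a + (if p then (1 : Int) else 0)) 0) (i + size) 0 -
      PySem.List.pyGetD ((num_list.map is_prime).scanl
        (fun a p => a + (if p then (1 : Int) else 0)) 0) i 0) == size)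
      && ((i == 0) || !(PySem.List.pyGetD (num_list.map is_prime) (i - 1) false))
      && ((i + size == (num_list.length : Int)) ||
          !(PySem.List.pyGetD (num_list.map is_prime) (i + size) false)))
    = condA num_list size (num_list.length : Int) i := by
  rw [pv_window_eq num_list size i hs h0 hiN]
  by_cases hi0 : i = 0
  · subst hi0
    have hsN : size ≠ (num_list.length : Int) := fun h => hx ⟨rfl, h⟩
    have h00 : ((0 : Int) == 0) = true := by decide
    have hne2 : (((0 : Int) + size) == (num_list.length : Int)) = false := by
      simpa using (by omega : (0 : Int) + size ≠ (num_list.length : Int))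
    rw [h00, Bool.true_or, Bool.and_true, hne2, Bool.false_or,
      pv_flag_eq num_list (0 + size) (by omega) (by omega)]
    have hd : decide ((0 : Int) + size < (num_list.length : Int)) = true := by
      simpa using (by omega : (0 : Int) + size < (num_list.length : Int))
    simp only [condA, beq_self_eq_true, if_true, hd, Bool.true_and]
  · have hne : (i == (0 : Int)) = false := by simpa using hi0
    rw [hne, Bool.false_or, pv_flag_eq num_list (i - 1) (by omega) (by omega)]
    rcases lt_or_eq_of_le hiN with hlt | heq
    · have hd : decide (i + size < (num_list.length : Int)) = true := by simpa using hlt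
      have hne2 : ((i + size) == (num_list.length : Int)) = false := by
        simpa using (by omega : i + size ≠ (num_list.length : Int))
      rw [pv_flag_eq num_list (i + size) (by omega) (by omega)]
      simp only [condA, hne, Bool.false_eq_true, if_false, hd, hne2, Bool.true_and,
        Bool.false_or, Bool.false_and, Bool.or_false, Bool.and_assoc]
    · have hd : decide (i + size < (num_list.length : Int)) = false := by
        simpa using (by omega : ¬ i + size < (num_list.length : Int))
      have heq2 : ((i + size) == (num_list.length : Int)) = true := by simpa using heq
      simp only [condA, hne, Bool.false_eq_true, if_false, hd, heq2, Bool.false_and,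
        Bool.true_or, Bool.and_true, Bool.false_or, Bool.true_and]

theorem pv_alt_eq (num_list : List Int) (size : Int) :
    has_prime_chain___alt num_list size =
      (match (PySem.List.pyRange 0 ((num_list.length : Int) - size + 1) 1).find? (fun i =>
          ((PySem.List.pyGetD ((num_list.map is_prime).scanl
              (fun a p => a + (if p then (1 : Int) else 0)) 0) (i + size) 0 -
            PySem.List.pyGetD ((num_list.map is_prime).scanl
              (fun a p => a + (if p then (1 : Int) else 0)) 0) i 0) == size)
          && ((i == 0) || !(PySem.List.pyGetD (num_list.map is_prime) (i - 1) false))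
          && ((i + size == (num_list.length : Int)) ||
              !(PySem.List.pyGetD (num_list.map is_prime) (i + size) false))) with
       | some i => i | none => -1) := rfl

-- when the whole list is the window, A's slice is the list itself
theorem pv_slice_all (num_list : List Int) (size : Int) (hsz : size = (num_list.length : Int)) :
    PySem.List.slice num_list (some 0) (some (0 + size)) = num_list := by
  rw [PySem.List.slice_toNat num_list (by omega) (by omega)]
  have h1 : ((0 : Int) + size).toNat = num_list.length := by omega
  simp only [h1, Int.toNat_zero, Nat.sub_zero, List.drop_zero, List.take_length]

theorem has_prime_chain___spec : Claim_unchanged_has_prime_chain__ := by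
  unfold Claim_unchanged_has_prime_chain__
  intro num_list size _hdom hpre
  unfold Spec_has_prime_chain__
  intro hnD
  have hs : 1 ≤ size := hpre
  rw [pv_alt_eq]
  unfold has_prime_chain__
  rw [loopA_eq num_list size hs ((num_list.length : Int) - size + 1).toNat 0 (by omega) (by omega)]
  by_cases hsz : size = (num_list.length : Int)
  · -- the excepted corner: the whole list would have to be prime, but ¬D_ rules that out
    have hex : ¬ ∀ x ∈ num_list, (2 ≤ x ∧ x.toNat.Prime) := fun h => hnD ⟨hs, hsz, h⟩
    obtain ⟨x, hx, hnp⟩ : ∃ x ∈ num_list, ¬(2 ≤ x ∧ x.toNat.Prime) := by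
      simpa using hex
    have hipx : is_prime x = false := by
      rcases hb : is_prime x with _ | _
      · rfl
      · exact absurd ((is_prime_iff x).mp hb) hnp
    have hwf : (PySem.List.slice num_list (some 0) (some (0 + size))).all
        (fun num => is_prime num) = false := by
      rw [pv_slice_all num_list size hsz, List.all_eq_false]
      exact ⟨x, hx, by simp [hipx]⟩
    have hcA : condA num_list size (num_list.length : Int) 0 = false := by
      simp only [condA, hwf, Bool.false_and]
    have hcB : (((PySem.List.pyGetD ((num_list.map is_prime).scanl
          (fun a p => a + (if p then (1 : Int) else 0)) 0) ((0 : Int) + size) 0 -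
        PySem.List.pyGetD ((num_list.map is_prime).scanl
          (fun a p => a + (if p then (1 : Int) else 0)) 0) (0 : Int) 0) == size)
        && (((0 : Int) == 0) || !(PySem.List.pyGetD (num_list.map is_prime) ((0 : Int) - 1) false))
        && (((0 : Int) + size == (num_list.length : Int)) ||
            !(PySem.List.pyGetD (num_list.map is_prime) ((0 : Int) + size) false))) = false := by
      rw [pv_window_eq num_list size 0 hs (by omega) (by omega), hwf, Bool.false_and,
        Bool.false_and]
    rw [show (num_list.length : Int) - size + 1 = 0 + 1 by omega,
      PySem.List.pyRange_one_singleton]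
    simp only [List.find?_singleton, hcA, hcB]
  · have hcong := pv_find?_congr (PySem.List.pyRange 0 ((num_list.length : Int) - size + 1) 1)
      (fun i =>
          ((PySem.List.pyGetD ((num_list.map is_prime).scanl
              (fun a p => a + (if p then (1 : Int) else 0)) 0) (i + size) 0 -
            PySem.List.pyGetD ((num_list.map is_prime).scanl
              (fun a p => a + (if p then (1 : Int) else 0)) 0) i 0) == size)
          && ((i == 0) || !(PySem.List.pyGetD (num_list.map is_prime) (i - 1) false))
          && ((i + size == (num_list.length : Int)) ||
              !(PySem.List.pyGetD (num_list.map is_prime) (i + size) false)))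
      (condA num_list size (num_list.length : Int)) ?_
    · rw [hcong]
    · intro j hj
      rw [PySem.List.mem_pyRange_one] at hj
      exact pv_cond_eq num_list size j hs hj.1 (by omega) (by rintro ⟨-, h⟩; exact hsz h)

theorem has_prime_chain___changed : Claim_changed_has_prime_chain__ := by
  unfold Claim_changed_has_prime_chain__; decide

theorem has_prime_chain___tight : Claim_exact_has_prime_chain__ := by
  unfold Claim_exact_has_prime_chain__
  intro num_list size _hdom hpre hD
  obtain ⟨hs, hsz, hall⟩ := hD
  have hw : (PySem.List.slice num_list (some 0) (some (0 + size))).all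
      (fun num => is_prime num) = true := by
    rw [pv_slice_all num_list size hsz, List.all_eq_true]
    intro x hx
    exact (is_prime_iff x).mpr (hall x hx)
  have hone : (num_list.length : Int) - size + 1 = 0 + 1 := by omega
  -- A returns -1: at index 0 the `index == 0 and index + size < N` check is false,
  -- no break fires, and the loop runs off the end
  have hA : has_prime_chain__ num_list size = -1 := by
    unfold has_prime_chain__
    rw [loopA_eq num_list size hs ((num_list.length : Int) - size + 1).toNat 0 (by omega) (by omega),
      hone, PySem.List.pyRange_one_singleton]
    have hd : decide ((0 : Int) + size < (num_list.length : Int)) = false := by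
      simpa using (by omega : ¬ (0 : Int) + size < (num_list.length : Int))
    have hcA : condA num_list size (num_list.length : Int) 0 = false := by
      simp only [condA, beq_self_eq_true, if_true, hd, Bool.false_and, Bool.and_false]
    simp [hcA]
  -- B returns 0: the full window is prime and both (absent) neighbours pass
  have hB : has_prime_chain___alt num_list size = 0 := by
    rw [pv_alt_eq, hone, PySem.List.pyRange_one_singleton]
    simp only [List.find?_singleton]
    rw [pv_window_eq num_list size 0 hs (by omega) (by omega), hw]
    simp [hsz]
  rw [hA, hB]
  decide
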